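-- pv_equiv track=rewrite | github.com/lambda-maniac/py_markov_chains_discord_bot | markov.py | split_spaces_and_keep_punctuation
-- ===== SOURCE A (Python) =====
-- def split_spaces_and_keep_punctuation(string, punctuation):
--     words = []
--     word  = ""
--
--     for char in string:
--
--         if char in " \n":
--             if word != "": words.append(word)
--             word = ""
--             continue
--
--         if char in punctuation:
--             if word != "": words.append(word)
--             words.append(char)
--             word = ""
--             continue
--
--         word += char
--
--     return words
-- ===== SOURCE B (Python) =====
-- def split_spaces_and_keep_punctuation(string, punctuation):
--     seps = [(i, ch) for i, ch in enumerate(string) if ch in " \n" or ch in punctuation]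
--     tokens = []
--     start = 0
--     for i, ch in seps:
--         if start < i:
--             tokens.append(string[start:i])
--         if ch not in " \n":
--             tokens.append(ch)
--         start = i + 1
--     return tokens
-- ===== Notes on version B (the rewrite author's own statement) =====
-- stated objective: alternative
-- what changed: Replaces A's per-character word accumulator with a two-phase scan: first collect the separator positions (whitespace or punctuation) with enumerate, then emit each slice between consecutive separators plus the punctuation characters themselves.
import Mathlib
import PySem

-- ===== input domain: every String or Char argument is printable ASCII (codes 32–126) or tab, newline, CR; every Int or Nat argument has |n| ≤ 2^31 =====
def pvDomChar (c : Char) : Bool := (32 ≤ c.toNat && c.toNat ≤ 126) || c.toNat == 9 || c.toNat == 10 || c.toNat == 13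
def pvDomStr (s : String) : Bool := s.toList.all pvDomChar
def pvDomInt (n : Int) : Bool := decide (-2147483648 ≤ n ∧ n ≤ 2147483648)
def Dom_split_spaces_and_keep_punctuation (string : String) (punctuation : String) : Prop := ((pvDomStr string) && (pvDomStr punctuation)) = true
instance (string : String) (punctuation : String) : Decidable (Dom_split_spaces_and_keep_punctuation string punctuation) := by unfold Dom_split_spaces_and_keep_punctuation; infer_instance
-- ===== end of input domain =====

-- B replaces A's per-character word accumulator by a two-phase scan (collect separator
-- positions, then slice the words out between them): an alternative of the same cost.

-- ===== PORT A =====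
-- state: (words so far, current word as a list of chars, in order)
def pvA_step (punct : List Char) (st : List String × List Char) (c : Char) :
    List String × List Char :=
  if c = ' ' ∨ c = '\n' then
    ((if st.2 ≠ [] then st.1 ++ [String.ofList st.2] else st.1), [])
  else if c ∈ punct then
    ((if st.2 ≠ [] then st.1 ++ [String.ofList st.2] else st.1) ++ [String.ofList [c]], [])
  else
    (st.1, st.2 ++ [c])

def split_spaces_and_keep_punctuation (string : String) (punctuation : String) : List String :=
  (string.toList.foldl (pvA_step punctuation.toList) ([], [])).1

-- ===== PORT B =====
-- state: (tokens so far, start index of the pending word); string[start:i] is PySem.List.slice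
def pvB_step (src : List Char) (st : List String × Int) (p : Int × Char) :
    List String × Int :=
  let toks := if st.2 < p.1 then st.1 ++ [String.ofList (PySem.List.slice src (some st.2) (some p.1))] else st.1
  let toks := if ¬ (p.2 = ' ' ∨ p.2 = '\n') then toks ++ [String.ofList [p.2]] else toks
  (toks, p.1 + 1)

def split_spaces_and_keep_punctuation_alt (string : String) (punctuation : String) : List String :=
  let s := string.toList
  let seps := (PySem.List.enumerate s 0).filter
    (fun p => decide (p.2 = ' ' ∨ p.2 = '\n' ∨ p.2 ∈ punctuation.toList))
  (seps.foldl (pvB_step s) ([], 0)).1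

-- ===== PRECONDITION & SPEC =====
def Spec_split_spaces_and_keep_punctuation (string : String) (punctuation : String) (out : List String) : Prop := out = split_spaces_and_keep_punctuation_alt string punctuation
instance (string : String) (punctuation : String) (out : List String) : Decidable (Spec_split_spaces_and_keep_punctuation string punctuation out) := by unfold Spec_split_spaces_and_keep_punctuation; infer_instance

-- ===== CLAIM (what is proved, stated in full; the proofs are below) =====
def Claim_equal_split_spaces_and_keep_punctuation : Prop := ∀ (string : String) (punctuation : String), Dom_split_spaces_and_keep_punctuation string punctuation → Spec_split_spaces_and_keep_punctuation string punctuation (split_spaces_and_keep_punctuation string punctuation)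

-- ===== LEMMAS AND PROOFS =====

-- a slice entirely inside the prefix s of s ++ [c] only sees s
lemma pvSlice_prefix (s : List Char) (c : Char) (a b : Int) (ha : 0 ≤ a)
    (hb : 0 ≤ b) (hbs : b ≤ (s.length : Int)) :
    PySem.List.slice (s ++ [c]) (some a) (some b) = PySem.List.slice s (some a) (some b) := by
  rw [PySem.List.slice_toNat (s ++ [c]) ha hb, PySem.List.slice_toNat s ha hb]
  by_cases hA : a.toNat ≤ s.length
  · rw [List.drop_append_of_le_length hA,
       List.take_append_of_le_length (by rw [List.length_drop]; omega)]
  · rw [List.drop_eq_nil_of_le (as := s ++ [c]) (i := a.toNat)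
          (by simp only [List.length_append, List.length_cons, List.length_nil]; omega),
        List.drop_eq_nil_of_le (as := s) (i := a.toNat) (by omega)]

-- the word ending at position |s| in s ++ [c], sliced out, is exactly a tail of s
lemma pvSlice_to_end (s : List Char) (c : Char) (a : Int) (ha : 0 ≤ a)
    (hle : a ≤ (s.length : Int)) :
    PySem.List.slice (s ++ [c]) (some a) (some (s.length : Int)) = s.drop a.toNat := by
  rw [PySem.List.slice_toNat (s ++ [c]) ha (by positivity),
      List.drop_append_of_le_length (by omega),
      List.take_append_of_le_length (by rw [List.length_drop]; omega)]
  exact List.take_of_length_le (by rw [List.length_drop]; omega)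

-- changing the slice source from s ++ [c] to s does not change a fold whose indices stay in s
lemma pvFoldB_ext (s : List Char) (c : Char) :
    ∀ (l : List (Int × Char)) (acc : List String × Int), 0 ≤ acc.2 →
      (∀ p ∈ l, 0 ≤ p.1 ∧ p.1 ≤ (s.length : Int)) →
      l.foldl (pvB_step (s ++ [c])) acc = l.foldl (pvB_step s) acc := by
  intro l
  induction l with
  | nil => intro acc _ _; rfl
  | cons p l ih =>
    intro acc hacc hl
    have hp := hl p (by simp)
    simp only [List.foldl_cons]
    rw [show pvB_step (s ++ [c]) acc p = pvB_step s acc p by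
      simp only [pvB_step, pvSlice_prefix s c acc.2 p.1 hacc hp.1 hp.2]]
    exact ih _ (by simp only [pvB_step]; omega) (fun q hq => hl q (by simp [hq]))

-- the loop invariant, by induction on the string from the right
lemma pvMain (ps : List Char) (s : List Char) :
    ((s.foldl (pvA_step ps) ([], [])).1
        = (((PySem.List.enumerate s 0).filter
            (fun p => decide (p.2 = ' ' ∨ p.2 = '\n' ∨ p.2 ∈ ps))).foldl (pvB_step s) ([], 0)).1)
      ∧ ((s.foldl (pvA_step ps) ([], [])).2
        = s.drop (((PySem.List.enumerate s 0).filter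
            (fun p => decide (p.2 = ' ' ∨ p.2 = '\n' ∨ p.2 ∈ ps))).foldl (pvB_step s) ([], 0)).2.toNat)
      ∧ (0 ≤ (((PySem.List.enumerate s 0).filter
            (fun p => decide (p.2 = ' ' ∨ p.2 = '\n' ∨ p.2 ∈ ps))).foldl (pvB_step s) ([], 0)).2)
      ∧ ((((PySem.List.enumerate s 0).filter
            (fun p => decide (p.2 = ' ' ∨ p.2 = '\n' ∨ p.2 ∈ ps))).foldl (pvB_step s) ([], 0)).2
          ≤ (s.length : Int)) := by
  induction s using List.reverseRecOn with
  | nil =>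
    simp [PySem.List.enumerate_nil]
  | append_singleton s c ih =>
    have hbound : ∀ p ∈ (PySem.List.enumerate s 0).filter
        (fun p => decide (p.2 = ' ' ∨ p.2 = '\n' ∨ p.2 ∈ ps)), 0 ≤ p.1 ∧ p.1 ≤ (s.length : Int) := by
      intro p hp
      have hp' := List.mem_of_mem_filter hp
      rw [PySem.List.mem_enumerate_iff] at hp'
      obtain ⟨k, hk, rfl⟩ := hp'
      refine ⟨by simp, by simp; omega⟩
    obtain ⟨ih1, ih2, ih3, ih4⟩ := ih
    rw [PySem.List.enumerate_append, PySem.List.enumerate_cons, PySem.List.enumerate_nil,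
        List.filter_append, zero_add]
    simp only [List.foldl_append]
    set B := ((PySem.List.enumerate s 0).filter
        (fun p => decide (p.2 = ' ' ∨ p.2 = '\n' ∨ p.2 ∈ ps))).foldl (pvB_step s) ([], 0) with hBdef
    rw [show ((PySem.List.enumerate s 0).filter
          (fun p => decide (p.2 = ' ' ∨ p.2 = '\n' ∨ p.2 ∈ ps))).foldl
            (pvB_step (s ++ [c])) ([], 0) = B from
      (pvFoldB_ext s c _ ([], 0) (le_refl 0) hbound).trans hBdef.symm]
    set A' := s.foldl (pvA_step ps) (([], []) : List String × List Char) with hA'def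
    simp only [List.foldl_cons, List.foldl_nil]
    by_cases hsep : c = ' ' ∨ c = '\n' ∨ c ∈ ps
    · -- c is a separator: the filtered tail is the single pair (|s|, c)
      rw [show List.filter (fun p => decide (p.2 = ' ' ∨ p.2 = '\n' ∨ p.2 ∈ ps))
          [(((s.length : Int)), c)] = [(((s.length : Int)), c)] from by simp [hsep]]
      simp only [List.foldl_cons, List.foldl_nil]
      have hlt : (B.2 < (s.length : Int)) ↔ A'.2 ≠ [] := by
        rw [ih2, ne_eq, List.drop_eq_nil_iff]
        omega
      have hslice : PySem.List.slice (s ++ [c]) (some B.2) (some (s.length : Int)) = A'.2 := by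
        rw [pvSlice_to_end s c B.2 ih3 ih4, ih2]
      have hB : pvB_step (s ++ [c]) B ((s.length : Int), c)
          = ((if ¬ (c = ' ' ∨ c = '\n') then
                (if B.2 < (s.length : Int) then B.1 ++ [String.ofList A'.2] else B.1)
                  ++ [String.ofList [c]]
              else (if B.2 < (s.length : Int) then B.1 ++ [String.ofList A'.2] else B.1)),
             (s.length : Int) + 1) := by
        simp only [pvB_step, hslice]
      by_cases hws : c = ' ' ∨ c = '\n'
      · have hA : pvA_step ps A' c
            = ((if A'.2 ≠ [] then A'.1 ++ [String.ofList A'.2] else A'.1), []) := by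
          simp only [pvA_step, if_pos hws]
        rw [hA, hB, if_neg (not_not_intro hws)]
        refine ⟨?_, ?_, by dsimp only; omega, by dsimp only; simp only [List.length_append, List.length_cons, List.length_nil]; push_cast; omega⟩
        · dsimp only
          by_cases hw : A'.2 = []
          · rw [if_neg (not_not_intro hw), if_neg (by rw [hlt]; exact not_not_intro hw)]
            exact ih1
          · rw [if_pos hw, if_pos (hlt.mpr hw), ih1]
        · dsimp only
          exact (List.drop_eq_nil_of_le (by simp)).symm
      · have hpunct : c ∈ ps := by tauto
        have hA : pvA_step ps A' c
            = ((if A'.2 ≠ [] then A'.1 ++ [String.ofList A'.2] else A'.1)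
                ++ [String.ofList [c]], []) := by
          simp only [pvA_step, if_neg hws, if_pos hpunct]
        rw [hA, hB, if_pos hws]
        refine ⟨?_, ?_, by dsimp only; omega, by dsimp only; simp only [List.length_append, List.length_cons, List.length_nil]; push_cast; omega⟩
        · dsimp only
          by_cases hw : A'.2 = []
          · rw [if_neg (not_not_intro hw), if_neg (by rw [hlt]; exact not_not_intro hw)]
            rw [ih1]
          · rw [if_pos hw, if_pos (hlt.mpr hw), ih1]
        · dsimp only
          exact (List.drop_eq_nil_of_le (by simp)).symm
    · -- c is not a separator
      rw [show List.filter (fun p => decide (p.2 = ' ' ∨ p.2 = '\n' ∨ p.2 ∈ ps))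
          [(((s.length : Int)), c)] = [] from by simp [hsep]]
      have hws : ¬ (c = ' ' ∨ c = '\n') := by tauto
      have hpunct : c ∉ ps := by tauto
      have hA : pvA_step ps A' c = (A'.1, A'.2 ++ [c]) := by
        simp only [pvA_step, if_neg hws, if_neg hpunct]
      rw [List.foldl_nil, hA]
      refine ⟨ih1, ?_, ih3, by simp only [List.length_append, List.length_cons, List.length_nil]; push_cast; omega⟩
      dsimp only
      rw [ih2, List.drop_append_of_le_length (by omega)]

-- ===== VERDICT (by name: the statement is the Claim_ definition above) =====
theorem split_spaces_and_keep_punctuation_spec : Claim_equal_split_spaces_and_keep_punctuation := by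
  intro string punctuation _
  unfold Spec_split_spaces_and_keep_punctuation split_spaces_and_keep_punctuation split_spaces_and_keep_punctuation_alt
  exact (pvMain punctuation.toList string.toList).1
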